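-- pv_equiv track=rewrite | github.com/stkim0124-code/Chemlens | backend/app/labint_intel.py | classify_family
-- ===== SOURCE A (Python) =====
-- from typing import Any, Dict, Iterable, List, Optional, Sequence, Tuple
--
-- def classify_family(name: str) -> Tuple[str, str, str]:
--     n = (name or "").lower()
--     if any(k in n for k in ["oxidation", "ozonolysis"]):
--         return ("oxidation", "oxidation", "redox")
--     if "reduction" in n or "deoxygenation" in n:
--         return ("reduction", "reduction", "redox")
--     if "rearrangement" in n or "cope" in n or "claisen" in n or "benzilic" in n:
--         return ("rearrangement", "rearrangement", "sigmatropic_or_rearrangement")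
--     if any(k in n for k in ["coupling", "cross-coupling", "metathesis"]):
--         t = "metathesis" if "metathesis" in n else "coupling"
--         return (t, t, "bond_construction")
--     if any(k in n for k in ["condensation", "aldol", "benzoin", "acyloin"]):
--         return ("condensation", "condensation", "carbon-carbon_bond_formation")
--     if any(k in n for k in ["elimination", "dehydration", "olefination"]):
--         return ("elimination", "elimination", "bond_reorganization")
--     if any(k in n for k in ["amination", "alkylation", "acylation", "homologation", "addition", "annulation"]):
--         return ("functionalization", "functionalization", "named_transformation")
--     if "synthesis" in n or "cyclization" in n:
--         return ("synthesis", "synthesis", "named_transformation")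
--     return ("other", "other", "named_transformation")
-- ===== SOURCE B (Python) =====
-- # One flat keyword->priority table scanned once with a running minimum, then a
-- # single indexed lookup into the family table (no ordered rule cascade / early return).
-- KEYWORD_PRIORITIES = [
--     ("oxidation", 0), ("ozonolysis", 0),
--     ("reduction", 1), ("deoxygenation", 1),
--     ("rearrangement", 2), ("cope", 2), ("claisen", 2), ("benzilic", 2),
--     ("metathesis", 3),
--     ("coupling", 4), ("cross-coupling", 4),
--     ("condensation", 5), ("aldol", 5), ("benzoin", 5), ("acyloin", 5),
--     ("elimination", 6), ("dehydration", 6), ("olefination", 6),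
--     ("amination", 7), ("alkylation", 7), ("acylation", 7),
--     ("homologation", 7), ("addition", 7), ("annulation", 7),
--     ("synthesis", 8), ("cyclization", 8),
-- ]
--
-- FAMILIES = [
--     ("oxidation", "oxidation", "redox"),
--     ("reduction", "reduction", "redox"),
--     ("rearrangement", "rearrangement", "sigmatropic_or_rearrangement"),
--     ("metathesis", "metathesis", "bond_construction"),
--     ("coupling", "coupling", "bond_construction"),
--     ("condensation", "condensation", "carbon-carbon_bond_formation"),
--     ("elimination", "elimination", "bond_reorganization"),
--     ("functionalization", "functionalization", "named_transformation"),
--     ("synthesis", "synthesis", "named_transformation"),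
--     ("other", "other", "named_transformation"),
-- ]
--
-- def classify_family(name):
--     n = (name or "").lower()
--     best = 9
--     for keyword, priority in KEYWORD_PRIORITIES:
--         if priority < best and keyword in n:
--             best = priority
--     return FAMILIES[best]
-- ===== Notes on version B (the rewrite author's own statement) =====
-- stated objective: alternative
-- what changed: Replaces the ordered if-chain of grouped keyword tests with one flat keyword-to-priority table scanned completely while keeping a running minimum priority, followed by a single indexed lookup into a family table (metathesis gets a lower priority than coupling to preserve precedence).
import Mathlib
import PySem

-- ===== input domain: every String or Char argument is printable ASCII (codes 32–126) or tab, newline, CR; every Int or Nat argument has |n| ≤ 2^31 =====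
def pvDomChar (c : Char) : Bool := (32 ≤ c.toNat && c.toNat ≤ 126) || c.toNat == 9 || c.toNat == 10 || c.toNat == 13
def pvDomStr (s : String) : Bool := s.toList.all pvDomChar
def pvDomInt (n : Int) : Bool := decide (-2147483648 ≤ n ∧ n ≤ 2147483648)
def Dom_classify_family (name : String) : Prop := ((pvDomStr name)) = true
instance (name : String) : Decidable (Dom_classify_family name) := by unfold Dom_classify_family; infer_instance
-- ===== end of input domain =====

-- B replaces A's ordered if-chain by a single running-minimum scan of a flat
-- keyword->priority table plus an indexed family lookup (alternative; same cost).

-- ===== PORT A =====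
def classify_family (name : String) : String × String × String :=
  let n := PySem.Str.lower (if name == "" then "" else name)
  if [ "oxidation", "ozonolysis" ].any (fun k => PySem.Str.isIn k n) then
    ("oxidation", "oxidation", "redox")
  else if PySem.Str.isIn "reduction" n || PySem.Str.isIn "deoxygenation" n then
    ("reduction", "reduction", "redox")
  else if PySem.Str.isIn "rearrangement" n || PySem.Str.isIn "cope" n ||
          PySem.Str.isIn "claisen" n || PySem.Str.isIn "benzilic" n then
    ("rearrangement", "rearrangement", "sigmatropic_or_rearrangement")
  else if [ "coupling", "cross-coupling", "metathesis" ].any (fun k => PySem.Str.isIn k n) then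
    let t := if PySem.Str.isIn "metathesis" n then "metathesis" else "coupling"
    (t, t, "bond_construction")
  else if [ "condensation", "aldol", "benzoin", "acyloin" ].any (fun k => PySem.Str.isIn k n) then
    ("condensation", "condensation", "carbon-carbon_bond_formation")
  else if [ "elimination", "dehydration", "olefination" ].any (fun k => PySem.Str.isIn k n) then
    ("elimination", "elimination", "bond_reorganization")
  else if [ "amination", "alkylation", "acylation", "homologation", "addition", "annulation" ].any
            (fun k => PySem.Str.isIn k n) then
    ("functionalization", "functionalization", "named_transformation")
  else if PySem.Str.isIn "synthesis" n || PySem.Str.isIn "cyclization" n then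
    ("synthesis", "synthesis", "named_transformation")
  else
    ("other", "other", "named_transformation")

-- ===== PORT B =====
def cfKW : List (String × Nat) :=
  [ ("oxidation", 0), ("ozonolysis", 0),
    ("reduction", 1), ("deoxygenation", 1),
    ("rearrangement", 2), ("cope", 2), ("claisen", 2), ("benzilic", 2),
    ("metathesis", 3),
    ("coupling", 4), ("cross-coupling", 4),
    ("condensation", 5), ("aldol", 5), ("benzoin", 5), ("acyloin", 5),
    ("elimination", 6), ("dehydration", 6), ("olefination", 6),
    ("amination", 7), ("alkylation", 7), ("acylation", 7),
    ("homologation", 7), ("addition", 7), ("annulation", 7),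
    ("synthesis", 8), ("cyclization", 8) ]

def cfFam : List (String × String × String) :=
  [ ("oxidation", "oxidation", "redox"),
    ("reduction", "reduction", "redox"),
    ("rearrangement", "rearrangement", "sigmatropic_or_rearrangement"),
    ("metathesis", "metathesis", "bond_construction"),
    ("coupling", "coupling", "bond_construction"),
    ("condensation", "condensation", "carbon-carbon_bond_formation"),
    ("elimination", "elimination", "bond_reorganization"),
    ("functionalization", "functionalization", "named_transformation"),
    ("synthesis", "synthesis", "named_transformation"),
    ("other", "other", "named_transformation") ]

-- the loop body: keep the smaller priority when the keyword occurs in n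
def cfStep (n : String) (b : Nat) (kp : String × Nat) : Nat :=
  if decide (kp.2 < b) && PySem.Str.isIn kp.1 n then kp.2 else b

-- FAMILIES[best] always has 0 ≤ best ≤ 9 in range, so getD's default is never used.
def classify_family_alt (name : String) : String × String × String :=
  let n := PySem.Str.lower (if name == "" then "" else name)
  let best := cfKW.foldl (cfStep n) 9
  cfFam.getD best ("other", "other", "named_transformation")

-- ===== PRECONDITION & SPEC =====
def Spec_classify_family (name : String) (out : String × String × String) : Prop := out = classify_family_alt name
instance (name : String) (out : String × String × String) : Decidable (Spec_classify_family name out) := by unfold Spec_classify_family; infer_instance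

-- ===== CLAIM =====
def Claim_equal_classify_family : Prop := ∀ (name : String), Dom_classify_family name → Spec_classify_family name (classify_family name)

-- ===== LEMMAS AND PROOFS =====

-- once the accumulator is not above p, a block of priority-p keywords leaves it unchanged
theorem cf_fold_stay (n : String) (p b : Nat) (ks : List String) (h : ¬ p < b) :
    (ks.map (fun k => (k, p))).foldl (cfStep n) b = b := by
  induction ks with
  | nil => rfl
  | cons k ks ih =>
    have h1 : cfStep n b (k, p) = b := by simp [cfStep, h]
    simp only [List.map_cons, List.foldl_cons]
    rw [h1, ih]

-- a block of keywords sharing priority p folds to: p if any matches and p < b, else b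
theorem cf_fold_group (n : String) (p : Nat) (ks : List String) (b : Nat) :
    (ks.map (fun k => (k, p))).foldl (cfStep n) b =
    if ks.any (fun k => PySem.Str.isIn k n) && decide (p < b) then p else b := by
  induction ks generalizing b with
  | nil => simp
  | cons k ks ih =>
    simp only [List.map_cons, List.foldl_cons, List.any_cons]
    by_cases hp : p < b
    · by_cases hk : PySem.Str.isIn k n = true
      · have h1 : cfStep n b (k, p) = p := by
          unfold cfStep; rw [hk, decide_eq_true hp]; simp
        rw [h1, cf_fold_stay n p p ks (lt_irrefl p)]
        simp only [hk, Bool.true_or]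
        simp [hp]
      · simp only [Bool.not_eq_true] at hk
        have h1 : cfStep n b (k, p) = b := by
          unfold cfStep; rw [hk]; simp
        rw [h1, ih]
        simp only [hk, Bool.false_or]
    · have h1 : cfStep n b (k, p) = b := by
        unfold cfStep; rw [decide_eq_false hp]; simp
      rw [h1, ih]
      simp [hp]

-- the chain and the min-scan agree for every lowered string n
set_option maxHeartbeats 2000000 in
theorem cf_chain_eq_scan (n : String) :
    (if [ "oxidation", "ozonolysis" ].any (fun k => PySem.Str.isIn k n) then
      (("oxidation", "oxidation", "redox") : String × String × String)
    else if PySem.Str.isIn "reduction" n || PySem.Str.isIn "deoxygenation" n then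
      ("reduction", "reduction", "redox")
    else if PySem.Str.isIn "rearrangement" n || PySem.Str.isIn "cope" n ||
            PySem.Str.isIn "claisen" n || PySem.Str.isIn "benzilic" n then
      ("rearrangement", "rearrangement", "sigmatropic_or_rearrangement")
    else if [ "coupling", "cross-coupling", "metathesis" ].any (fun k => PySem.Str.isIn k n) then
      let t := if PySem.Str.isIn "metathesis" n then "metathesis" else "coupling"
      (t, t, "bond_construction")
    else if [ "condensation", "aldol", "benzoin", "acyloin" ].any (fun k => PySem.Str.isIn k n) then
      ("condensation", "condensation", "carbon-carbon_bond_formation")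
    else if [ "elimination", "dehydration", "olefination" ].any (fun k => PySem.Str.isIn k n) then
      ("elimination", "elimination", "bond_reorganization")
    else if [ "amination", "alkylation", "acylation", "homologation", "addition", "annulation" ].any
              (fun k => PySem.Str.isIn k n) then
      ("functionalization", "functionalization", "named_transformation")
    else if PySem.Str.isIn "synthesis" n || PySem.Str.isIn "cyclization" n then
      ("synthesis", "synthesis", "named_transformation")
    else
      ("other", "other", "named_transformation")) =
    cfFam.getD (cfKW.foldl (cfStep n) 9) ("other", "other", "named_transformation") := by
  have hkw : cfKW =
      (["oxidation", "ozonolysis"].map (fun k => (k, (0 : Nat)))) ++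
      (["reduction", "deoxygenation"].map (fun k => (k, (1 : Nat)))) ++
      (["rearrangement", "cope", "claisen", "benzilic"].map (fun k => (k, (2 : Nat)))) ++
      (["metathesis"].map (fun k => (k, (3 : Nat)))) ++
      (["coupling", "cross-coupling"].map (fun k => (k, (4 : Nat)))) ++
      (["condensation", "aldol", "benzoin", "acyloin"].map (fun k => (k, (5 : Nat)))) ++
      (["elimination", "dehydration", "olefination"].map (fun k => (k, (6 : Nat)))) ++
      (["amination", "alkylation", "acylation", "homologation", "addition", "annulation"].map
        (fun k => (k, (7 : Nat)))) ++
      (["synthesis", "cyclization"].map (fun k => (k, (8 : Nat)))) := by rfl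
  rw [hkw]
  simp only [List.foldl_append]
  by_cases h0 : (["oxidation", "ozonolysis"].any (fun k => PySem.Str.isIn k n)) = true
  · -- group 0 matches: best = 0, later groups cannot lower it
    simp only [List.any_cons, List.any_nil, Bool.or_false, Bool.or_assoc] at h0
    have e : (["oxidation", "ozonolysis"].map (fun k => (k, (0 : Nat)))).foldl (cfStep n) 9 = 0 := by
      rw [cf_fold_group]
      simp only [List.any_cons, List.any_nil, Bool.or_false, Bool.or_assoc, h0]
      rfl
    rw [e, cf_fold_stay n 1 0 _ (by omega), cf_fold_stay n 2 0 _ (by omega), cf_fold_stay n 3 0 _ (by omega), cf_fold_stay n 4 0 _ (by omega), cf_fold_stay n 5 0 _ (by omega), cf_fold_stay n 6 0 _ (by omega), cf_fold_stay n 7 0 _ (by omega), cf_fold_stay n 8 0 _ (by omega)]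
    simp only [h0, List.any_cons, List.any_nil, Bool.or_false, Bool.or_assoc, Bool.false_or, Bool.true_or, Bool.or_true, Bool.false_eq_true, eq_self_iff_true, if_true, if_false]
    rfl
  · simp only [Bool.not_eq_true] at h0
    simp only [List.any_cons, List.any_nil, Bool.or_false, Bool.or_assoc] at h0
    have e : (["oxidation", "ozonolysis"].map (fun k => (k, (0 : Nat)))).foldl (cfStep n) 9 = 9 := by
      rw [cf_fold_group]
      simp only [List.any_cons, List.any_nil, Bool.or_false, Bool.or_assoc, h0]
      rfl
    rw [e]
    by_cases h1 : (PySem.Str.isIn "reduction" n || PySem.Str.isIn "deoxygenation" n) = true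
    · -- group 1 matches: best = 1, later groups cannot lower it
      have e : (["reduction", "deoxygenation"].map (fun k => (k, (1 : Nat)))).foldl (cfStep n) 9 = 1 := by
        rw [cf_fold_group]
        simp only [List.any_cons, List.any_nil, Bool.or_false, Bool.or_assoc, h1]
        rfl
      rw [e, cf_fold_stay n 2 1 _ (by omega), cf_fold_stay n 3 1 _ (by omega), cf_fold_stay n 4 1 _ (by omega), cf_fold_stay n 5 1 _ (by omega), cf_fold_stay n 6 1 _ (by omega), cf_fold_stay n 7 1 _ (by omega), cf_fold_stay n 8 1 _ (by omega)]
      simp only [h0, h1, List.any_cons, List.any_nil, Bool.or_false, Bool.or_assoc, Bool.false_or, Bool.true_or, Bool.or_true, Bool.false_eq_true, eq_self_iff_true, if_true, if_false]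
      rfl
    · simp only [Bool.not_eq_true] at h1
      have e : (["reduction", "deoxygenation"].map (fun k => (k, (1 : Nat)))).foldl (cfStep n) 9 = 9 := by
        rw [cf_fold_group]
        simp only [List.any_cons, List.any_nil, Bool.or_false, Bool.or_assoc, h1]
        rfl
      rw [e]
      by_cases h2 : (PySem.Str.isIn "rearrangement" n || PySem.Str.isIn "cope" n || PySem.Str.isIn "claisen" n || PySem.Str.isIn "benzilic" n) = true
      · -- group 2 matches: best = 2, later groups cannot lower it
        simp only [Bool.or_assoc] at h2
        have e : (["rearrangement", "cope", "claisen", "benzilic"].map (fun k => (k, (2 : Nat)))).foldl (cfStep n) 9 = 2 := by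
          rw [cf_fold_group]
          simp only [List.any_cons, List.any_nil, Bool.or_false, Bool.or_assoc, h2]
          rfl
        rw [e, cf_fold_stay n 3 2 _ (by omega), cf_fold_stay n 4 2 _ (by omega), cf_fold_stay n 5 2 _ (by omega), cf_fold_stay n 6 2 _ (by omega), cf_fold_stay n 7 2 _ (by omega), cf_fold_stay n 8 2 _ (by omega)]
        simp only [h0, h1, h2, List.any_cons, List.any_nil, Bool.or_false, Bool.or_assoc, Bool.false_or, Bool.true_or, Bool.or_true, Bool.false_eq_true, eq_self_iff_true, if_true, if_false]
        rfl
      · simp only [Bool.not_eq_true] at h2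
        simp only [Bool.or_assoc] at h2
        have e : (["rearrangement", "cope", "claisen", "benzilic"].map (fun k => (k, (2 : Nat)))).foldl (cfStep n) 9 = 9 := by
          rw [cf_fold_group]
          simp only [List.any_cons, List.any_nil, Bool.or_false, Bool.or_assoc, h2]
          rfl
        rw [e]
        by_cases hm : PySem.Str.isIn "metathesis" n = true
        · -- group 3 matches: best = 3, later groups cannot lower it
          have e : (["metathesis"].map (fun k => (k, (3 : Nat)))).foldl (cfStep n) 9 = 3 := by
            rw [cf_fold_group]
            simp only [List.any_cons, List.any_nil, Bool.or_false, Bool.or_assoc, hm]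
            rfl
          rw [e, cf_fold_stay n 4 3 _ (by omega), cf_fold_stay n 5 3 _ (by omega), cf_fold_stay n 6 3 _ (by omega), cf_fold_stay n 7 3 _ (by omega), cf_fold_stay n 8 3 _ (by omega)]
          simp only [h0, h1, h2, hm, List.any_cons, List.any_nil, Bool.or_false, Bool.or_assoc, Bool.false_or, Bool.true_or, Bool.or_true, Bool.false_eq_true, eq_self_iff_true, if_true, if_false]
          rfl
        · simp only [Bool.not_eq_true] at hm
          have e : (["metathesis"].map (fun k => (k, (3 : Nat)))).foldl (cfStep n) 9 = 9 := by
            rw [cf_fold_group]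
            simp only [List.any_cons, List.any_nil, Bool.or_false, Bool.or_assoc, hm]
            rfl
          rw [e]
          by_cases hc : (["coupling", "cross-coupling"].any (fun k => PySem.Str.isIn k n)) = true
          · -- group 4 matches: best = 4, later groups cannot lower it
            simp only [List.any_cons, List.any_nil, Bool.or_false, Bool.or_assoc] at hc
            have e : (["coupling", "cross-coupling"].map (fun k => (k, (4 : Nat)))).foldl (cfStep n) 9 = 4 := by
              rw [cf_fold_group]
              simp only [List.any_cons, List.any_nil, Bool.or_false, Bool.or_assoc, hc]
              rfl
            rw [e, cf_fold_stay n 5 4 _ (by omega), cf_fold_stay n 6 4 _ (by omega), cf_fold_stay n 7 4 _ (by omega), cf_fold_stay n 8 4 _ (by omega)]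
            simp only [h0, h1, h2, hm, hc, List.any_cons, List.any_nil, Bool.or_false, Bool.or_assoc, Bool.false_or, Bool.true_or, Bool.or_true, Bool.false_eq_true, eq_self_iff_true, if_true, if_false]
            rfl
          · simp only [Bool.not_eq_true] at hc
            simp only [List.any_cons, List.any_nil, Bool.or_false, Bool.or_assoc] at hc
            have e : (["coupling", "cross-coupling"].map (fun k => (k, (4 : Nat)))).foldl (cfStep n) 9 = 9 := by
              rw [cf_fold_group]
              simp only [List.any_cons, List.any_nil, Bool.or_false, Bool.or_assoc, hc]
              rfl
            rw [e]
            by_cases h5 : (["condensation", "aldol", "benzoin", "acyloin"].any (fun k => PySem.Str.isIn k n)) = true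
            · -- group 5 matches: best = 5, later groups cannot lower it
              simp only [List.any_cons, List.any_nil, Bool.or_false, Bool.or_assoc] at h5
              have e : (["condensation", "aldol", "benzoin", "acyloin"].map (fun k => (k, (5 : Nat)))).foldl (cfStep n) 9 = 5 := by
                rw [cf_fold_group]
                simp only [List.any_cons, List.any_nil, Bool.or_false, Bool.or_assoc, h5]
                rfl
              rw [e, cf_fold_stay n 6 5 _ (by omega), cf_fold_stay n 7 5 _ (by omega), cf_fold_stay n 8 5 _ (by omega)]
              simp only [h0, h1, h2, hm, hc, h5, List.any_cons, List.any_nil, Bool.or_false, Bool.or_assoc, Bool.false_or, Bool.true_or, Bool.or_true, Bool.false_eq_true, eq_self_iff_true, if_true, if_false]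
              rfl
            · simp only [Bool.not_eq_true] at h5
              simp only [List.any_cons, List.any_nil, Bool.or_false, Bool.or_assoc] at h5
              have e : (["condensation", "aldol", "benzoin", "acyloin"].map (fun k => (k, (5 : Nat)))).foldl (cfStep n) 9 = 9 := by
                rw [cf_fold_group]
                simp only [List.any_cons, List.any_nil, Bool.or_false, Bool.or_assoc, h5]
                rfl
              rw [e]
              by_cases h6 : (["elimination", "dehydration", "olefination"].any (fun k => PySem.Str.isIn k n)) = true
              · -- group 6 matches: best = 6, later groups cannot lower it
                simp only [List.any_cons, List.any_nil, Bool.or_false, Bool.or_assoc] at h6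
                have e : (["elimination", "dehydration", "olefination"].map (fun k => (k, (6 : Nat)))).foldl (cfStep n) 9 = 6 := by
                  rw [cf_fold_group]
                  simp only [List.any_cons, List.any_nil, Bool.or_false, Bool.or_assoc, h6]
                  rfl
                rw [e, cf_fold_stay n 7 6 _ (by omega), cf_fold_stay n 8 6 _ (by omega)]
                simp only [h0, h1, h2, hm, hc, h5, h6, List.any_cons, List.any_nil, Bool.or_false, Bool.or_assoc, Bool.false_or, Bool.true_or, Bool.or_true, Bool.false_eq_true, eq_self_iff_true, if_true, if_false]
                rfl
              · simp only [Bool.not_eq_true] at h6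
                simp only [List.any_cons, List.any_nil, Bool.or_false, Bool.or_assoc] at h6
                have e : (["elimination", "dehydration", "olefination"].map (fun k => (k, (6 : Nat)))).foldl (cfStep n) 9 = 9 := by
                  rw [cf_fold_group]
                  simp only [List.any_cons, List.any_nil, Bool.or_false, Bool.or_assoc, h6]
                  rfl
                rw [e]
                by_cases h7 : (["amination", "alkylation", "acylation", "homologation", "addition", "annulation"].any (fun k => PySem.Str.isIn k n)) = true
                · -- group 7 matches: best = 7, later groups cannot lower it
                  simp only [List.any_cons, List.any_nil, Bool.or_false, Bool.or_assoc] at h7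
                  have e : (["amination", "alkylation", "acylation", "homologation", "addition", "annulation"].map (fun k => (k, (7 : Nat)))).foldl (cfStep n) 9 = 7 := by
                    rw [cf_fold_group]
                    simp only [List.any_cons, List.any_nil, Bool.or_false, Bool.or_assoc, h7]
                    rfl
                  rw [e, cf_fold_stay n 8 7 _ (by omega)]
                  simp only [h0, h1, h2, hm, hc, h5, h6, h7, List.any_cons, List.any_nil, Bool.or_false, Bool.or_assoc, Bool.false_or, Bool.true_or, Bool.or_true, Bool.false_eq_true, eq_self_iff_true, if_true, if_false]
                  rfl
                · simp only [Bool.not_eq_true] at h7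
                  simp only [List.any_cons, List.any_nil, Bool.or_false, Bool.or_assoc] at h7
                  have e : (["amination", "alkylation", "acylation", "homologation", "addition", "annulation"].map (fun k => (k, (7 : Nat)))).foldl (cfStep n) 9 = 9 := by
                    rw [cf_fold_group]
                    simp only [List.any_cons, List.any_nil, Bool.or_false, Bool.or_assoc, h7]
                    rfl
                  rw [e]
                  by_cases h8 : (PySem.Str.isIn "synthesis" n || PySem.Str.isIn "cyclization" n) = true
                  · -- group 8 matches: best = 8, later groups cannot lower it
                    have e : (["synthesis", "cyclization"].map (fun k => (k, (8 : Nat)))).foldl (cfStep n) 9 = 8 := by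
                      rw [cf_fold_group]
                      simp only [List.any_cons, List.any_nil, Bool.or_false, Bool.or_assoc, h8]
                      rfl
                    rw [e]
                    simp only [h0, h1, h2, hm, hc, h5, h6, h7, h8, List.any_cons, List.any_nil, Bool.or_false, Bool.or_assoc, Bool.false_or, Bool.true_or, Bool.or_true, Bool.false_eq_true, eq_self_iff_true, if_true, if_false]
                    rfl
                  · simp only [Bool.not_eq_true] at h8
                    have e : (["synthesis", "cyclization"].map (fun k => (k, (8 : Nat)))).foldl (cfStep n) 9 = 9 := by
                      rw [cf_fold_group]
                      simp only [List.any_cons, List.any_nil, Bool.or_false, Bool.or_assoc, h8]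
                      rfl
                    rw [e]
                    simp only [h0, h1, h2, hm, hc, h5, h6, h7, h8, List.any_cons, List.any_nil, Bool.or_false, Bool.or_assoc, Bool.false_or, Bool.true_or, Bool.or_true, Bool.false_eq_true, eq_self_iff_true, if_true, if_false]
                    rfl

-- ===== VERDICT =====
theorem classify_family_spec : Claim_equal_classify_family := by
  intro name _
  unfold Spec_classify_family classify_family classify_family_alt
  exact cf_chain_eq_scan _
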